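-- pv_equiv track=rewrite | github.com/gerardpuchebonjorn/pclai-gerard | lai_pipeline/harmonize.py | detect_canonical_chrom_mapping
-- ===== SOURCE A (Python) =====
-- from typing import Dict, List, Optional
--
-- def detect_canonical_chrom_mapping(contigs: List[str]) -> Dict[str, str]:
--     """
--     Given a list of contig names from a VCF, return a mapping
--     of canonical chrom (e.g. '1', 'X') to the actual contig name used
--     in that VCF (e.g. 'chr1', 'chrX').
--     """
--     contig_set = set(contigs)
--
--     def choose(canonical: str) -> Optional[str]:
--         if canonical == "MT":
--             candidates = ["chrM", "MT", "chrMT", "M"]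
--         else:
--             candidates = [f"chr{canonical}", canonical]
--         for c in candidates:
--             if c in contig_set:
--                 return c
--         return None
--
--     mapping: Dict[str, str] = {}
--     for c in [str(i) for i in range(1, 23)] + ["X", "Y", "MT"]:
--         picked = choose(c)
--         if picked:
--             mapping[c] = picked
--     return mapping
-- ===== SOURCE B (Python) =====
-- from typing import Dict, List, Optional
--
-- _MT_SYNS = ["chrM", "MT", "chrMT", "M"]
-- _PLAIN = [str(i) for i in range(1, 23)] + ["X", "Y"]
--
--
-- def _classify(contig: str) -> Optional[tuple]:
--     """Which canonical name does this contig spell, and with what preference rank?"""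
--     if contig in _MT_SYNS:
--         return ("MT", _MT_SYNS.index(contig))
--     if contig[:3] == "chr" and contig[3:] in _PLAIN:
--         return (contig[3:], 0)
--     if contig in _PLAIN:
--         return (contig, 1)
--     return None
--
--
-- def detect_canonical_chrom_mapping(contigs: List[str]) -> Dict[str, str]:
--     # One pass over the contigs, keeping the best-ranked spelling per canonical.
--     best: Dict[str, tuple] = {}
--     for contig in contigs:
--         hit = _classify(contig)
--         if hit is None:
--             continue
--         canonical, rank = hit
--         prev = best.get(canonical)
--         if prev is None or rank < prev[0]:
--             best[canonical] = (rank, contig)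
--     return {c: best[c][1] for c in _PLAIN + ["MT"] if c in best}
-- ===== Notes on version B (the rewrite author's own statement) =====
-- stated objective: alternative
-- what changed: B replaces A's 25 membership probes against a set of the contigs by a single pass over the contigs that classifies each contig to (canonical, preference rank) and keeps the best-ranked spelling per canonical in a dict, then emits in canonical order.
import Mathlib
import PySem

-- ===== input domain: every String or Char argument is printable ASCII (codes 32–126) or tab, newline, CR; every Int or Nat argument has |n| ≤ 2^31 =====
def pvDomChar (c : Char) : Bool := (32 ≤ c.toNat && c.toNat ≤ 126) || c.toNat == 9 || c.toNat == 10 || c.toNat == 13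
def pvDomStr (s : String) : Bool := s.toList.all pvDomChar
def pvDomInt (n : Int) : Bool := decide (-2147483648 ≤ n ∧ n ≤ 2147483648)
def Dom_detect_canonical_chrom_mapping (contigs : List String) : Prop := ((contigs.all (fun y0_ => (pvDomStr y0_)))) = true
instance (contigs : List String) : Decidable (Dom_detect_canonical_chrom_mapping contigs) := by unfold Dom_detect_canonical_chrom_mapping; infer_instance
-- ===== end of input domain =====

-- A builds set(contigs) and probes it with each canonical's candidate spellings;
-- B (alternative, same cost) classifies each contig in one pass, keeping the best-ranked
-- spelling per canonical in a dict, then emits the picks in canonical order.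

-- ===== PORT A =====
-- the inner `choose` loop: first candidate found in contig_set
def pvChooseGo (contigSet : PySem.Set String) : List String → Option String
  | [] => none
  | c :: rest => if PySem.Set.contains contigSet c then some c else pvChooseGo contigSet rest

def pvChoose (contigSet : PySem.Set String) (canonical : String) : Option String :=
  let candidates : List String :=
    if canonical = "MT" then ["chrM", "MT", "chrMT", "M"]
    else ["chr" ++ canonical, canonical]   -- f"chr{canonical}"
  pvChooseGo contigSet candidates

def detect_canonical_chrom_mapping (contigs : List String) : List (String × String) :=
  let contigSet := PySem.Set.ofList contigs
  (((PySem.List.pyRange 1 23 1).map PySem.Int.toStr ++ ["X", "Y", "MT"]).foldl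
    (fun (mapping : PySem.Dict String String) c =>
      match pvChoose contigSet c with
      | some picked => if picked ≠ "" then mapping.insert c picked else mapping  -- `if picked:` truthiness
      | none => mapping)
    PySem.Dict.empty).items

-- ===== PORT B =====
def pvMtSyns : List String := ["chrM", "MT", "chrMT", "M"]
def pvPlain : List String := (PySem.List.pyRange 1 23 1).map PySem.Int.toStr ++ ["X", "Y"]

def pvClassify (contig : String) : Option (String × Int) :=
  match PySem.List.index? pvMtSyns contig with           -- `contig in _MT_SYNS` + `.index(contig)`
  | some i => some ("MT", (i : Int))
  | none =>
    if PySem.Str.slice contig none (some 3) = "chr" ∧ PySem.Str.slice contig (some 3) none ∈ pvPlain then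
      some (PySem.Str.slice contig (some 3) none, 0)
    else if contig ∈ pvPlain then
      some (contig, 1)
    else none

def detect_canonical_chrom_mapping_alt (contigs : List String) : List (String × String) :=
  let best := contigs.foldl
    (fun (best : PySem.Dict String (Int × String)) contig =>
      match pvClassify contig with
      | none => best
      | some (canonical, rank) =>
        match best.get? canonical with
        | none => best.insert canonical (rank, contig)
        | some prev => if rank < prev.1 then best.insert canonical (rank, contig) else best)
    PySem.Dict.empty
  ((pvPlain ++ ["MT"]).foldl
    (fun (out : PySem.Dict String String) c =>
      match best.get? c with
      | some p => out.insert c p.2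
      | none => out)
    PySem.Dict.empty).items

-- ===== PRECONDITION & SPEC =====
def Spec_detect_canonical_chrom_mapping (contigs : List String) (out : List (String × String)) : Prop := out = detect_canonical_chrom_mapping_alt contigs
instance (contigs : List String) (out : List (String × String)) : Decidable (Spec_detect_canonical_chrom_mapping contigs out) := by unfold Spec_detect_canonical_chrom_mapping; infer_instance

-- ===== CLAIM (what is proved, stated in full; the proofs are below) =====
def Claim_equal_detect_canonical_chrom_mapping : Prop := ∀ (contigs : List String), Dom_detect_canonical_chrom_mapping contigs → Spec_detect_canonical_chrom_mapping contigs (detect_canonical_chrom_mapping contigs)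

-- ===== LEMMAS AND PROOFS =====

-- per-canonical contribution of a single contig to B's `best` dict
def pvEntry (c : String) (a : String) : Option (Int × String) :=
  match pvClassify a with
  | some (c', r) => if c' = c then some (r, a) else none
  | none => none

-- keep the older entry unless the newer one has a strictly smaller rank
def pvCombine : Option (Int × String) → Option (Int × String) → Option (Int × String)
  | p, none => p
  | none, some q => some q
  | some p, some q => if q.1 < p.1 then some q else some p

def pvFirstIn (c : String) : List String → Option (Int × String)
  | [] => none
  | a :: t => pvCombine (pvEntry c a) (pvFirstIn c t)

-- first candidate (in candidate order, ranks from `off`) that occurs in l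
def pvScan : List String → Int → List String → Option (Int × String)
  | [], _, _ => none
  | k :: t, off, l => if k ∈ l then some (off, k) else pvScan t (off + 1) l

lemma pvCombine_none_right (p : Option (Int × String)) : pvCombine p none = p := by
  cases p <;> rfl

lemma pvCombine_none_left (q : Option (Int × String)) : pvCombine none q = q := by
  cases q <;> rfl

lemma pvScan_nil (cs : List String) (off : Int) : pvScan cs off [] = none := by
  induction cs generalizing off with
  | nil => rfl
  | cons k t ih => simp [pvScan, ih]

lemma pvCombine_assoc (x y z : Option (Int × String)) :
    pvCombine (pvCombine x y) z = pvCombine x (pvCombine y z) := by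
  rcases x with _ | ⟨rx, sx⟩ <;> rcases y with _ | ⟨ry, sy⟩ <;> rcases z with _ | ⟨rz, sz⟩ <;>
    simp only [pvCombine] <;> split_ifs <;> (try simp only [pvCombine]) <;> (try split_ifs) <;>
    first | rfl | (exfalso; omega)

lemma pvScan_some {cs : List String} {off : Int} {l : List String} {p : Int × String}
    (h : pvScan cs off l = some p) : off ≤ p.1 ∧ p.2 ∈ cs := by
  induction cs generalizing off with
  | nil => simp [pvScan] at h
  | cons k t ih =>
    by_cases hk : k ∈ l
    · simp [pvScan, hk] at h
      simp [← h]
    · simp [pvScan, hk] at h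
      rcases ih h with ⟨h1, h2⟩
      exact ⟨by omega, by simp [h2]⟩

lemma pvScan_cons (cs : List String) (off : Int) (a : String) (t : List String) :
    pvCombine ((PySem.List.index? cs a).map (fun (i : Nat) => ((off + (i : Int)), a))) (pvScan cs off t)
      = pvScan cs off (a :: t) := by
  induction cs generalizing off with
  | nil => simp [pvScan, PySem.List.index?_eq_idxOf?, pvCombine]
  | cons k t' ih =>
    by_cases hak : a = k
    · subst hak
      rw [PySem.List.index?_cons_self]
      have hmem : a ∈ a :: t := List.mem_cons_self ..
      by_cases hkt : a ∈ t
      · simp [pvScan, hkt, hmem, pvCombine]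
      · cases hq : pvScan t' (off + 1) t with
        | none => simp [pvScan, hkt, hmem, hq, pvCombine]
        | some p =>
          have h1 := (pvScan_some hq).1
          simp only [pvScan, if_neg hkt, if_pos hmem, hq, Option.map_some, pvCombine]
          rw [if_neg (by omega)]
          norm_num
    · rw [PySem.List.index?_cons_of_ne t' (fun h => hak h.symm)]
      have hknat : (k ∈ a :: t) ↔ (k ∈ t) := by
        constructor
        · intro h; rcases List.mem_cons.mp h with h | h
          · exact absurd h.symm hak
          · exact h
        · exact List.mem_cons_of_mem _
      by_cases hkt : k ∈ t
      · have hkat : k ∈ a :: t := List.mem_cons_of_mem _ hkt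
        cases hi : PySem.List.index? t' a with
        | none => simp [pvScan, hkt, hkat, pvCombine]
        | some i =>
          simp only [pvScan, if_pos hkt, if_pos hkat, Option.map_some, pvCombine]
          rw [if_pos (by omega)]
      · have hkat : k ∉ a :: t := fun h => hkt (hknat.mp h)
        have hfun : ∀ i : Nat, off + ((i : Int) + 1) = (off + 1) + (i : Int) := by
          intro i; omega
        simp only [pvScan, if_neg hkt, if_neg hkat]
        rw [← ih (off + 1)]
        cases hi : PySem.List.index? t' a with
        | none => simp
        | some i => simp; rw [hfun]

lemma pvPlain_facts : ∀ x ∈ pvPlain, x ∉ pvMtSyns ∧ x.toList.length ≤ 2 ∧ x ≠ "" := by decide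
lemma pvMT_not_plain : ("MT" : String) ∉ pvPlain := by decide
lemma pvM_not_plain : ("M" : String) ∉ pvPlain := by decide

lemma pvChr_toList (c : String) : ("chr" ++ c).toList = 'c' :: 'h' :: 'r' :: c.toList := by
  rw [String.toList_append]; rfl

lemma pvSlice3_iff (a : String) :
    PySem.Str.slice a none (some 3) = "chr" ↔ a.toList.take 3 = ['c', 'h', 'r'] := by
  rw [← String.toList_inj]
  rw [PySem.Str.toList_slice, PySem.Chars.slice_eq_listSlice,
    PySem.List.slice_to _ (by norm_num)]
  rfl

lemma pvSliceFrom_toList (a : String) :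
    (PySem.Str.slice a (some 3) none).toList = a.toList.drop 3 := by
  rw [PySem.Str.toList_slice, PySem.Chars.slice_eq_listSlice,
    PySem.List.slice_from _ (by norm_num)]
  rfl

lemma pvSliceFrom_eq_iff (a c : String) :
    PySem.Str.slice a (some 3) none = c ↔ a.toList.drop 3 = c.toList := by
  rw [← String.toList_inj, pvSliceFrom_toList]

lemma pvSliceFrom_chr (c : String) : PySem.Str.slice ("chr" ++ c) (some 3) none = c := by
  rw [pvSliceFrom_eq_iff, pvChr_toList]
  rfl

lemma pvSlice3_chr (c : String) : PySem.Str.slice ("chr" ++ c) none (some 3) = "chr" := by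
  rw [pvSlice3_iff, pvChr_toList]
  rfl

lemma pvChr_ne_mt {c : String} (hc : c ∈ pvPlain) : ("chr" ++ c) ∉ pvMtSyns := by
  intro hm
  have h4 : _ := hm
  simp [pvMtSyns] at h4
  rcases h4 with h | h | h | h <;>
    rw [← String.toList_inj, pvChr_toList] at h <;> simp at h
  · have hcM : c = "M" := String.toList_inj.mp (by rw [h]; rfl)
    exact pvM_not_plain (hcM ▸ hc)
  · have hcMT : c = "MT" := String.toList_inj.mp (by rw [h]; rfl)
    exact pvMT_not_plain (hcMT ▸ hc)

lemma pvClassify_eq (contig : String) :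
    pvClassify contig =
      match PySem.List.index? pvMtSyns contig with
      | some i => some ("MT", (i : Int))
      | none =>
        if PySem.Str.slice contig none (some 3) = "chr" ∧ PySem.Str.slice contig (some 3) none ∈ pvPlain then
          some (PySem.Str.slice contig (some 3) none, 0)
        else if contig ∈ pvPlain then some (contig, 1)
        else none := rfl

lemma pvEntry_mt (a : String) :
    pvEntry "MT" a = (PySem.List.index? pvMtSyns a).map (fun (i : Nat) => (((i : Int)), a)) := by
  unfold pvEntry
  rw [pvClassify_eq]
  cases hm : PySem.List.index? pvMtSyns a with
  | some i => simp
  | none =>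
    by_cases h1 : PySem.Str.slice a none (some 3) = "chr" ∧ PySem.Str.slice a (some 3) none ∈ pvPlain
    · have hneq : PySem.Str.slice a (some 3) none ≠ "MT" := fun he => pvMT_not_plain (he ▸ h1.2)
      simp [h1, hneq]
    · by_cases h2 : a ∈ pvPlain
      · have hneq : a ≠ "MT" := fun he => pvMT_not_plain (he ▸ h2)
        simp [h1, h2, hneq]
      · simp [h1, h2]

lemma pvChr_cond {c : String} (hc : c ∈ pvPlain) :
    PySem.Str.slice ("chr" ++ c) none (some 3) = "chr" ∧
      PySem.Str.slice ("chr" ++ c) (some 3) none ∈ pvPlain :=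
  ⟨pvSlice3_chr c, by rw [pvSliceFrom_chr]; exact hc⟩

lemma pvEntry_plain {c : String} (hc : c ∈ pvPlain) (a : String) :
    pvEntry c a = (PySem.List.index? ["chr" ++ c, c] a).map (fun (i : Nat) => (((i : Int)), a)) := by
  have hcfacts := pvPlain_facts c hc
  have hcnotmt : c ≠ "MT" := fun he => pvMT_not_plain (he ▸ hc)
  unfold pvEntry
  rw [pvClassify_eq]
  cases hm : PySem.List.index? pvMtSyns a with
  | some i =>
    have ham : a ∈ pvMtSyns := (PySem.List.index?_isSome_iff _ _).mp (by rw [hm]; rfl)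
    have ha1 : a ≠ "chr" ++ c := fun he => pvChr_ne_mt hc (he ▸ ham)
    have ha2 : a ≠ c := fun he => hcfacts.1 (he ▸ ham)
    rw [PySem.List.index?_cons_of_ne _ (fun h => ha1 h.symm),
      PySem.List.index?_cons_of_ne _ (fun h => ha2 h.symm)]
    simp [Ne.symm hcnotmt, PySem.List.index?_eq_idxOf?, List.idxOf?]
  | none =>
    by_cases h1 : PySem.Str.slice a none (some 3) = "chr" ∧ PySem.Str.slice a (some 3) none ∈ pvPlain
    · have halen : 3 ≤ a.toList.length := by
        have h3 : a.toList.take 3 = ['c', 'h', 'r'] := (pvSlice3_iff a).mp h1.1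
        have hlen3 : (a.toList.take 3).length = 3 := by rw [h3]; rfl
        rw [List.length_take] at hlen3
        omega
      by_cases htc : PySem.Str.slice a (some 3) none = c
      · have hac : a = "chr" ++ c := by
          rw [← String.toList_inj, pvChr_toList]
          have hd : a.toList.drop 3 = c.toList := (pvSliceFrom_eq_iff a c).mp htc
          have ht : a.toList.take 3 = ['c', 'h', 'r'] := (pvSlice3_iff a).mp h1.1
          calc a.toList = a.toList.take 3 ++ a.toList.drop 3 := (List.take_append_drop 3 a.toList).symm
            _ = 'c' :: 'h' :: 'r' :: c.toList := by rw [hd, ht]; rfl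
        rw [hac, PySem.List.index?_cons_self]
        rw [← hac]
        simp [h1, htc, hc]
      · have ha1 : a ≠ "chr" ++ c := fun he => htc (he ▸ pvSliceFrom_chr c)
        have ha2 : a ≠ c := by
          intro he
          have hle : a.toList.length ≤ 2 := by rw [he]; exact hcfacts.2.1
          omega
        rw [PySem.List.index?_cons_of_ne _ (fun h => ha1 h.symm),
          PySem.List.index?_cons_of_ne _ (fun h => ha2 h.symm)]
        simp [h1, htc, PySem.List.index?_eq_idxOf?, List.idxOf?]
    · have ha1 : a ≠ "chr" ++ c := fun he => h1 (he ▸ pvChr_cond hc)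
      by_cases h2 : a ∈ pvPlain
      · rw [PySem.List.index?_cons_of_ne _ (fun h => ha1 h.symm)]
        by_cases ha2 : a = c
        · subst ha2
          rw [PySem.List.index?_cons_self]
          simp [h1, h2]
        · rw [PySem.List.index?_cons_of_ne _ (fun h => ha2 h.symm)]
          simp [h1, h2, ha2, PySem.List.index?_eq_idxOf?, List.idxOf?]
      · have ha2 : a ≠ c := fun he => h2 (he ▸ hc)
        rw [PySem.List.index?_cons_of_ne _ (fun h => ha1 h.symm),
          PySem.List.index?_cons_of_ne _ (fun h => ha2 h.symm)]
        simp [h1, h2, PySem.List.index?_eq_idxOf?, List.idxOf?]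

lemma pvFirstIn_eq_scan (c : String) (cs : List String)
    (h : ∀ a, pvEntry c a = (PySem.List.index? cs a).map (fun (i : Nat) => (((i : Int)), a))) :
    ∀ l, pvFirstIn c l = pvScan cs 0 l := by
  intro l
  induction l with
  | nil => simp [pvFirstIn, pvScan_nil]
  | cons a t ih =>
    have hz : (fun (i : Nat) => (((i : Int)), a)) = (fun (i : Nat) => (((0 : Int) + (i : Int)), a)) := by
      funext i; simp
    calc pvFirstIn c (a :: t) = pvCombine (pvEntry c a) (pvFirstIn c t) := rfl
      _ = pvCombine ((PySem.List.index? cs a).map (fun (i : Nat) => (((0 : Int) + (i : Int)), a))) (pvScan cs 0 t) := by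
          rw [h a, ih, hz]
      _ = pvScan cs 0 (a :: t) := pvScan_cons cs 0 a t

lemma pvFold_get (l : List String) (d : PySem.Dict String (Int × String)) (c : String) :
    (l.foldl
      (fun (best : PySem.Dict String (Int × String)) contig =>
        match pvClassify contig with
        | none => best
        | some (canonical, rank) =>
          match best.get? canonical with
          | none => best.insert canonical (rank, contig)
          | some prev => if rank < prev.1 then best.insert canonical (rank, contig) else best)
      d).get? c = pvCombine (d.get? c) (pvFirstIn c l) := by
  induction l generalizing d with
  | nil => simp [pvFirstIn, pvCombine_none_right]
  | cons a t ih =>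
    rw [List.foldl_cons, ih]
    have hstep : ∀ (d : PySem.Dict String (Int × String)),
        ((match pvClassify a with
          | none => d
          | some (canonical, rank) =>
            match d.get? canonical with
            | none => d.insert canonical (rank, a)
            | some prev => if rank < prev.1 then d.insert canonical (rank, a) else d) :
          PySem.Dict String (Int × String)).get? c
        = pvCombine (d.get? c) (pvEntry c a) := by
      intro d
      unfold pvEntry
      cases hcl : pvClassify a with
      | none => simp [pvCombine_none_right]
      | some pr =>
        obtain ⟨c', r⟩ := pr
        by_cases hc : c = c'
        · subst hc
          cases hg : d.get? c with
          | none => simp [hg, pvCombine]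
          | some prev =>
            by_cases hr : r < prev.1
            · simp [hg, hr, pvCombine]
            · simp [hg, hr, pvCombine]
        · have hne : c ≠ c' := hc
          have hne' : c' ≠ c := fun h => hne h.symm
          cases hg : d.get? c' with
          | none => simp [hg, PySem.Dict.get?_insert_of_ne _ _ hne, hne', pvCombine_none_right]
          | some prev =>
            by_cases hr : r < prev.1 <;>
              simp [hg, hr, PySem.Dict.get?_insert_of_ne _ _ hne, hne', pvCombine_none_right]
    rw [hstep d]
    show pvCombine (pvCombine (d.get? c) (pvEntry c a)) (pvFirstIn c t)
        = pvCombine (d.get? c) (pvFirstIn c (a :: t))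
    rw [pvCombine_assoc]
    rfl

lemma pvChooseGo_eq_scan (l : List String) (cs : List String) (off : Int) :
    pvChooseGo (PySem.Set.ofList l) cs = (pvScan cs off l).map Prod.snd := by
  induction cs generalizing off with
  | nil => rfl
  | cons k t ih =>
    by_cases hk : k ∈ l
    · have hc : PySem.Set.contains (PySem.Set.ofList l) k = true := by
        simp [PySem.Set.contains]; exact hk
      simp [pvChooseGo, pvScan, hk]
    · have hc : PySem.Set.contains (PySem.Set.ofList l) k = false := by
        simp [PySem.Set.contains]; exact hk
      simp [pvChooseGo, pvScan, hk, ih (off + 1)]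

lemma pvMtSyns_ne_empty : ∀ x ∈ pvMtSyns, x ≠ "" := by decide

lemma pvChrc_ne_empty (c : String) : "chr" ++ c ≠ "" := by
  intro h
  have := congrArg String.toList h
  rw [pvChr_toList] at this
  simp at this

-- the contig-indexed `best` fold of B, named for the proofs below
def pvBestFold (contigs : List String) : PySem.Dict String (Int × String) :=
  contigs.foldl
    (fun (best : PySem.Dict String (Int × String)) contig =>
      match pvClassify contig with
      | none => best
      | some (canonical, rank) =>
        match best.get? canonical with
        | none => best.insert canonical (rank, contig)
        | some prev => if rank < prev.1 then best.insert canonical (rank, contig) else best)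
    PySem.Dict.empty

lemma pvBestFold_get (contigs : List String) (c : String) :
    (pvBestFold contigs).get? c = pvFirstIn c contigs := by
  unfold pvBestFold
  rw [pvFold_get]
  rw [PySem.Dict.get?_empty, pvCombine_none_left]

def pvCands (c : String) : List String :=
  if c = "MT" then ["chrM", "MT", "chrMT", "M"] else ["chr" ++ c, c]

lemma pvFirstIn_scan_cands {c : String} (hc : c ∈ pvPlain ∨ c = "MT") (l : List String) :
    pvFirstIn c l = pvScan (pvCands c) 0 l := by
  rcases hc with hc | hc
  · have hnm : c ≠ "MT" := fun he => pvMT_not_plain (he ▸ hc)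
    rw [show pvCands c = ["chr" ++ c, c] from if_neg hnm]
    exact pvFirstIn_eq_scan c _ (pvEntry_plain hc) l
  · subst hc
    rw [show pvCands "MT" = pvMtSyns from rfl]
    exact pvFirstIn_eq_scan "MT" pvMtSyns pvEntry_mt l

lemma pvChoose_eq_get {contigs : List String} {c : String} (hc : c ∈ pvPlain ∨ c = "MT") :
    pvChoose (PySem.Set.ofList contigs) c = Option.map Prod.snd ((pvBestFold contigs).get? c) := by
  rw [pvBestFold_get, pvFirstIn_scan_cands hc]
  show pvChooseGo (PySem.Set.ofList contigs) (pvCands c) = _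
  exact pvChooseGo_eq_scan contigs (pvCands c) 0

lemma pvPicked_ne_empty {contigs : List String} {c : String} (hc : c ∈ pvPlain ∨ c = "MT")
    {p : Int × String} (hp : (pvBestFold contigs).get? c = some p) : p.2 ≠ "" := by
  rw [pvBestFold_get, pvFirstIn_scan_cands hc] at hp
  have hmem := (pvScan_some hp).2
  rcases hc with hc | hc
  · rw [pvCands, if_neg (show ¬ c = "MT" from fun he => pvMT_not_plain (he ▸ hc))] at hmem
    rcases List.mem_cons.mp hmem with h | h
    · rw [h]; exact pvChrc_ne_empty c
    · simp only [List.mem_singleton] at h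
      rw [h]; exact (pvPlain_facts c hc).2.2
  · subst hc
    rw [pvCands, if_pos rfl] at hmem
    exact pvMtSyns_ne_empty _ hmem

lemma pvK_eq : (PySem.List.pyRange 1 23 1).map PySem.Int.toStr ++ ["X", "Y", "MT"]
    = pvPlain ++ ["MT"] := by
  rw [pvPlain, List.append_assoc]
  rfl

-- ===== VERDICT (by name: the statement is the Claim_ definition above) =====
theorem detect_canonical_chrom_mapping_spec : Claim_equal_detect_canonical_chrom_mapping := by
  intro contigs _
  unfold Spec_detect_canonical_chrom_mapping
  unfold detect_canonical_chrom_mapping detect_canonical_chrom_mapping_alt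
  rw [pvK_eq]
  dsimp only
  congr 1
  apply PySem.List.foldl_congr_mem
  intro m c hcK
  have hc : c ∈ pvPlain ∨ c = "MT" := by
    rcases List.mem_append.mp hcK with h | h
    · exact Or.inl h
    · simp at h; exact Or.inr h
  rw [pvChoose_eq_get hc]
  show (match Option.map Prod.snd ((pvBestFold contigs).get? c) with
        | some picked => if picked ≠ "" then m.insert c picked else m
        | none => m)
      = (match (pvBestFold contigs).get? c with
        | some p => m.insert c p.2
        | none => m)
  cases hb : (pvBestFold contigs).get? c with
  | none => rfl
  | some p =>
    simp only [Option.map_some]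
    rw [if_pos (pvPicked_ne_empty hc hb)]
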